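-- pv_equiv track=rewrite | github.com/m-tranter/cathedral | python/Y8/playfair.py | cipherWords
-- ===== SOURCE A (Python) =====
-- def cipherWords(text):
--     """Prepares the cipher in lines of 5-letter cipher words for printing."""
--     msg = text[0]
--     for i, letter in enumerate(text[1:],1):
--         if i % 25 == 0:
--             msg += '\n'
--         elif i % 5 == 0:
--             msg += ' '
--         msg += letter
--     return msg
-- ===== SOURCE B (Python) =====
-- def cipherWords(text):
--     """Prepares the cipher in lines of 5-letter cipher words for printing."""
--     words = [text[i:i+5] for i in range(0, len(text), 5)]
--     lines = [' '.join(words[j:j+5]) for j in range(0, len(words), 5)]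
--     return '\n'.join(lines)
-- ===== Notes on version B (the rewrite author's own statement) =====
-- stated objective: faster
-- what changed: Replaces the per-character enumerate loop with a modulo counter by a chunk-and-join decomposition: slice the text into 5-char words, join every 5 words with spaces into a line, join lines with newlines.
-- outside the precondition, e.g. on cipherWords(''): A raises IndexError, B returns ''
import Mathlib
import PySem

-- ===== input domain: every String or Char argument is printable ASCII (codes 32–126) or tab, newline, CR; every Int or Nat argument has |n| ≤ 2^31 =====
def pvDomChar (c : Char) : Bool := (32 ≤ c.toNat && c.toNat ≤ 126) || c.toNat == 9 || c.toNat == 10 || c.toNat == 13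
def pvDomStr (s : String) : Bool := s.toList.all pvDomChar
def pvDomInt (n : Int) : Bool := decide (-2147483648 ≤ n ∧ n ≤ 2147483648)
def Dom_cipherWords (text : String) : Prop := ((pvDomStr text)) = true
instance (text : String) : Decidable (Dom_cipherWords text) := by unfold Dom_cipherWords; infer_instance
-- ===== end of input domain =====

-- B replaces A's per-character modulo-counter loop by a chunk-and-join decomposition (5-char words, 5 words per line); measured constant-factor faster in Python.


-- ===== PORT A =====
-- msg = text[0]; for i, letter in enumerate(text[1:], 1): append '\n' / ' ' by i % 25 / i % 5, then letter.
def cipherWords (text : String) : String :=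
  match PySem.Str.pyGet? text 0 with
  | none => ""   -- text[0] raises IndexError on the empty string; excluded by Pre_
  | some c0 =>
    String.ofList ((PySem.List.enumerate (PySem.Str.slice text (some 1) none).toList 1).foldl
      (fun msg p =>
        (if PySem.Int.mod p.1 25 = 0 then msg ++ ['\n']
         else if PySem.Int.mod p.1 5 = 0 then msg ++ [' ']
         else msg) ++ [p.2]) [c0])

-- ===== PORT B =====
-- words = [text[i:i+5] for i in range(0, len(text), 5)]; lines = [' '.join(words[j:j+5]) for j in range(0, len(words), 5)]; '\n'.join(lines)
def cipherWords_alt (text : String) : String :=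
  let words : List (List Char) :=
    (PySem.List.pyRange 0 (PySem.Str.len text) 5).map
      (fun i => (PySem.Str.slice text (some i) (some (i + 5))).toList)
  let lines : List (List Char) :=
    (PySem.List.pyRange 0 (words.length : Int) 5).map
      (fun j => PySem.Chars.join [' '] (PySem.List.slice words (some j) (some (j + 5))))
  String.ofList (PySem.Chars.join ['\n'] lines)

-- ===== PRECONDITION & SPEC =====
-- Pre_ excludes only the empty string, on which A raises IndexError (text[0]); B returns "" there.
def Pre_cipherWords (text : String) : Prop := text ≠ ""
instance (text : String) : Decidable (Pre_cipherWords text) := by unfold Pre_cipherWords; infer_instance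
def pvWitness_cipherWords : String := "abcdefghij"

def Spec_cipherWords (text : String) (out : String) : Prop := out = cipherWords_alt text
instance (text : String) (out : String) : Decidable (Spec_cipherWords text out) := by unfold Spec_cipherWords; infer_instance

-- ===== CLAIM (what is proved, stated in full; the proofs are below) =====
def Claim_equal_cipherWords : Prop := ∀ (text : String), Dom_cipherWords text → Pre_cipherWords text → Spec_cipherWords text (cipherWords text)

-- ===== LEMMAS AND PROOFS =====

-- the separator A inserts before the letter at (1-based) position i
def pvPref (i : Int) : List Char :=
  if PySem.Int.mod i 25 = 0 then ['\n'] else if PySem.Int.mod i 5 = 0 then [' '] else []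

-- the character stream both programs produce after the first letter
def pvCanon (i : Int) : List Char → List Char
  | [] => []
  | c :: t => pvPref i ++ c :: pvCanon (i + 1) t

-- the list of 5-element chunks of l (what B's range/slice comprehension builds)
def pvChunks {α : Type} (l : List α) : List (List α) :=
  if h : l = [] then [] else l.take 5 :: pvChunks (l.drop 5)
termination_by l.length
decreasing_by
  have : 0 < l.length := List.length_pos_iff.mpr h
  simp [List.length_drop]; omega

theorem pvCanon_append (a b : List Char) : ∀ (i : Int),
    pvCanon i (a ++ b) = pvCanon i a ++ pvCanon (i + a.length) b := by
  induction a with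
  | nil => intro i; simp [pvCanon]
  | cons c t ih =>
    intro i
    simp [pvCanon, ih (i + 1)]
    ring_nf

theorem pvPref_period (i : Int) : pvPref (i + 25) = pvPref i := by
  unfold pvPref
  simp only [PySem.Int.mod_eq_emod_of_pos (show (0:Int) < 25 by norm_num),
      PySem.Int.mod_eq_emod_of_pos (show (0:Int) < 5 by norm_num)]
  rw [show (i + 25) % 25 = i % 25 by omega, show (i + 25) % 5 = i % 5 by omega]

theorem pvCanon_period (t : List Char) : ∀ (i : Int), pvCanon (i + 25) t = pvCanon i t := by
  induction t with
  | nil => intro i; simp [pvCanon]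
  | cons c r ih =>
    intro i
    simp only [pvCanon, pvPref_period]
    have : i + 25 + 1 = (i + 1) + 25 := by ring
    rw [this, ih (i + 1)]

theorem pvPref_eq_nil (i : Int) (h1 : 1 ≤ i) (h2 : i ≤ 24) (h5 : i % 5 ≠ 0) : pvPref i = [] := by
  unfold pvPref
  simp only [PySem.Int.mod_eq_emod_of_pos (show (0:Int) < 25 by norm_num),
      PySem.Int.mod_eq_emod_of_pos (show (0:Int) < 5 by norm_num)]
  rw [if_neg (by omega), if_neg (by omega)]

theorem pvCanon_id (t : List Char) : ∀ (i : Int), 1 ≤ i → i + t.length ≤ 5 → pvCanon i t = t := by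
  induction t with
  | nil => intro i _ _; simp [pvCanon]
  | cons c r ih =>
    intro i h1 h2
    simp only [List.length_cons] at h2
    have : pvPref i = [] := pvPref_eq_nil i h1 (by omega) (by omega)
    simp [pvCanon, this, ih (i + 1) (by omega) (by omega)]

theorem pvCanon_shift (t : List Char) : ∀ (i j : Int), 1 ≤ i → 1 ≤ j →
    i % 5 = j % 5 → i + t.length ≤ 25 → j + t.length ≤ 25 → pvCanon i t = pvCanon j t := by
  induction t with
  | nil => intro i j _ _ _ _ _; simp [pvCanon]
  | cons c r ih =>
    intro i j hi hj hm h2 h2'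
    simp only [List.length_cons] at h2 h2'
    have hp : pvPref i = pvPref j := by
      unfold pvPref
      simp only [PySem.Int.mod_eq_emod_of_pos (show (0:Int) < 25 by norm_num),
          PySem.Int.mod_eq_emod_of_pos (show (0:Int) < 5 by norm_num)]
      have hi25 : i % 25 ≠ 0 := by omega
      have hj25 : j % 25 ≠ 0 := by omega
      rw [if_neg hi25, if_neg hj25, hm]
    simp [pvCanon, hp, ih (i + 1) (j + 1) (by omega) (by omega) (by omega) (by omega) (by omega)]

-- ===== A-side characterisation =====
theorem pvA_fold (t : List Char) : ∀ (i : Int) (acc : List Char),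
    (PySem.List.enumerate t i).foldl
      (fun msg p =>
        (if PySem.Int.mod p.1 25 = 0 then msg ++ ['\n']
         else if PySem.Int.mod p.1 5 = 0 then msg ++ [' ']
         else msg) ++ [p.2]) acc
      = acc ++ pvCanon i t := by
  induction t with
  | nil => intro i acc; simp [PySem.List.enumerate, pvCanon]
  | cons c r ih =>
    intro i acc
    rw [PySem.List.enumerate_cons, List.foldl_cons, ih (i + 1)]
    simp only [pvCanon, pvPref]
    split_ifs <;> simp

theorem pvA_eq (text : String) (c : Char) (t : List Char) (h : text.toList = c :: t) :
    cipherWords text = String.ofList (c :: pvCanon 1 t) := by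
  unfold cipherWords
  have h0 : PySem.Str.pyGet? text 0 = some c := by
    simp [h]
  rw [h0]
  have hs : (PySem.Str.slice text (some 1) none).toList = t := by
    simp [h, PySem.List.slice_from_one]
  show String.ofList ((PySem.List.enumerate (PySem.Str.slice text (some 1) none).toList 1).foldl
      (fun msg p =>
        (if PySem.Int.mod p.1 25 = 0 then msg ++ ['\n']
         else if PySem.Int.mod p.1 5 = 0 then msg ++ [' ']
         else msg) ++ [p.2]) [c]) = _
  rw [hs, pvA_fold]
  simp

-- ===== B-side characterisation =====
theorem pvRange5_shift (a b c : Int) :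
    PySem.List.pyRange (a + c) (b + c) 5 = (PySem.List.pyRange a b 5).map (· + c) := by
  rw [PySem.List.pyRange_of_pos _ _ (by norm_num), PySem.List.pyRange_of_pos _ _ (by norm_num),
      List.map_map]
  have hif : (if a + c < b + c then ((b + c - (a + c) + 5 - 1) / 5).toNat else 0)
      = (if a < b then ((b - a + 5 - 1) / 5).toNat else 0) := by
    by_cases hab : a < b
    · rw [if_pos (by omega), if_pos hab]; congr 1; omega
    · rw [if_neg (by omega), if_neg hab]
  rw [hif]
  exact List.map_congr_left (fun k _ => by simp; ring)

theorem pvRange5_cons (a b : Int) (hab : a < b) :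
    PySem.List.pyRange a b 5 = a :: PySem.List.pyRange (a + 5) b 5 := by
  rw [PySem.List.pyRange_of_pos _ _ (by norm_num), PySem.List.pyRange_of_pos _ _ (by norm_num)]
  have hm : ((b - a + 5 - 1) / 5).toNat = ((b - (a + 5) + 5 - 1) / 5).toNat + 1 := by
    have : b - a + 5 - 1 = (b - (a + 5) + 5 - 1) + 5 := by ring
    rw [this]
    omega
  rw [if_pos hab, hm]
  by_cases h5 : a + 5 < b
  · rw [if_pos h5, List.range_succ_eq_map, List.map_cons, List.map_map]
    refine congrArg₂ _ (by ring) ?_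
    exact List.map_congr_left (fun k _ => by simp; ring)
  · rw [if_neg h5]
    have : (b - (a + 5) + 5 - 1) / 5 ≤ 0 := by omega
    have h0 : ((b - (a + 5) + 5 - 1) / 5).toNat = 0 := by omega
    rw [h0]
    simp

theorem pvRange5_nil (a b : Int) (hab : b ≤ a) : PySem.List.pyRange a b 5 = [] := by
  rw [PySem.List.pyRange_of_pos _ _ (by norm_num), if_neg (by omega)]
  simp

theorem pvWords_eq {α : Type} (l : List α) :
    (PySem.List.pyRange 0 (l.length : Int) 5).map
      (fun i => PySem.List.slice l (some i) (some (i + 5))) = pvChunks l := by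
  by_cases hnil : l = []
  · subst hnil; rw [pvChunks]; simp [pvRange5_nil 0 0 le_rfl]
  · have hpos : 0 < l.length := List.length_pos_iff.mpr hnil
    rw [pvChunks, dif_neg hnil, pvRange5_cons 0 (l.length : Int) (by exact_mod_cast hpos)]
    rw [List.map_cons]
    have hhead : PySem.List.slice l (some 0) (some (0 + 5)) = l.take 5 := by
      rw [PySem.List.slice_toNat _ le_rfl (by norm_num)]
      simp
    rw [hhead]
    congr 1
    have hshift : PySem.List.pyRange (0 + 5) (l.length : Int) 5
        = (PySem.List.pyRange 0 ((l.length : Int) - 5) 5).map (· + 5) := by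
      have h := pvRange5_shift 0 ((l.length : Int) - 5) 5
      rw [show ((l.length : Int) - 5) + 5 = (l.length : Int) by ring] at h
      exact h
    rw [hshift, List.map_map]
    have hrec := pvWords_eq (l.drop 5)
    by_cases h5 : l.length ≤ 5
    · have hd : l.drop 5 = [] := by
        apply List.eq_nil_of_length_eq_zero; simp [List.length_drop]; omega
      rw [pvRange5_nil 0 _ (by push_cast; omega), hd, pvChunks]
      simp
    · have hlen : ((l.drop 5).length : Int) = (l.length : Int) - 5 := by
        simp [List.length_drop]; omega
      rw [← hlen] at *
      rw [← hrec]
      apply List.map_congr_left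
      intro i hi
      have hi0 : 0 ≤ i := ((PySem.List.mem_pyRange_iff_of_pos (by norm_num) i).mp hi).1
      simp only [Function.comp]
      rw [PySem.List.slice_toNat _ (by omega) (by omega),
          PySem.List.slice_toNat _ (by omega) (by omega)]
      rw [List.drop_drop]
      congr 1
      · omega
      · congr 1; omega
termination_by l.length
decreasing_by
  have : 0 < l.length := List.length_pos_iff.mpr hnil
  simp [List.length_drop]; omega

theorem pvB_eq (text : String) :
    cipherWords_alt text
      = String.ofList (PySem.Chars.join ['\n']
          ((pvChunks (pvChunks text.toList)).map (PySem.Chars.join [' ']))) := by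
  unfold cipherWords_alt
  have hw : (PySem.List.pyRange 0 (PySem.Str.len text) 5).map
      (fun i => (PySem.Str.slice text (some i) (some (i + 5))).toList)
      = pvChunks text.toList := by
    have h1 : PySem.Str.len text = ((text.toList.length : Nat) : Int) := by
      simp [PySem.Str.len]
    rw [h1, ← pvWords_eq text.toList]
    apply List.map_congr_left
    intro i _
    simp
  simp only [hw]
  have hl : (PySem.List.pyRange 0 ((pvChunks text.toList).length : Int) 5).map
      (fun j => PySem.Chars.join [' ']
        (PySem.List.slice (pvChunks text.toList) (some j) (some (j + 5))))
      = (pvChunks (pvChunks text.toList)).map (PySem.Chars.join [' ']) := by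
    rw [← pvWords_eq (pvChunks text.toList), List.map_map]
    rfl
  rw [hl]

-- chunk structure lemmas
theorem pvChunks_ne_nil {α : Type} (l : List α) (h : l ≠ []) : pvChunks l ≠ [] := by
  rw [pvChunks, dif_neg h]; simp

theorem pvChunks_length {α : Type} (l : List α) : (pvChunks l).length = (l.length + 4) / 5 := by
  by_cases h : l = []
  · subst h; rw [pvChunks]; simp
  · have hpos : 0 < l.length := List.length_pos_iff.mpr h
    rw [pvChunks, dif_neg h]
    simp only [List.length_cons, pvChunks_length (l.drop 5), List.length_drop]
    omega
termination_by l.length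
decreasing_by
  have : 0 < l.length := List.length_pos_iff.mpr h
  simp [List.length_drop]; omega

theorem pvChunks_small {α : Type} (l : List α) (h : l ≠ []) (h5 : l.length ≤ 5) :
    pvChunks l = [l] := by
  rw [pvChunks, dif_neg h, List.take_of_length_le h5]
  have : l.drop 5 = [] := by apply List.eq_nil_of_length_eq_zero; simp [List.length_drop]; omega
  rw [this, pvChunks]
  simp

theorem pvChunks_append {α : Type} (a : List α) : ∀ (b : List α), a.length % 5 = 0 →
    pvChunks (a ++ b) = pvChunks a ++ pvChunks b := by
  by_cases h : a = []
  · intro b _; subst h; conv_lhs => rw [List.nil_append]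
    rw [show pvChunks ([] : List α) = [] from by rw [pvChunks]; simp]
    rw [List.nil_append]
  · intro b hm
    have hpos : 0 < a.length := List.length_pos_iff.mpr h
    have h5 : 5 ≤ a.length := by omega
    have hab : a ++ b ≠ [] := by simp [h]
    conv_lhs => rw [pvChunks]
    rw [dif_neg hab]
    conv_rhs => rw [pvChunks]
    rw [dif_neg h]
    rw [List.take_append_of_le_length h5, List.drop_append_of_le_length h5]
    rw [pvChunks_append (a.drop 5) b (by simp [List.length_drop]; omega)]
    simp
termination_by a.length
decreasing_by
  have : 0 < a.length := List.length_pos_iff.mpr h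
  simp [List.length_drop]; omega

-- a single line: join-with-spaces of the chunks is the spaced character stream
theorem pvLine (n : Nat) : ∀ (c : Char) (t : List Char), t.length ≤ n → t.length ≤ 24 →
    PySem.Chars.join [' '] (pvChunks (c :: t)) = c :: pvCanon 1 t := by
  induction n with
  | zero =>
    intro c t ht _
    have : t = [] := by apply List.eq_nil_of_length_eq_zero; omega
    subst this
    rw [pvChunks_small _ (by simp) (by simp), PySem.Chars.join_singleton]
    simp [pvCanon]
  | succ n ih =>
    intro c t ht h24
    by_cases h4 : t.length ≤ 4
    · rw [pvChunks_small _ (by simp) (by simp; omega), PySem.Chars.join_singleton]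
      rw [pvCanon_id t 1 (by norm_num) (by omega)]
    · -- t.length ≥ 5; peel the first chunk c :: t.take 4
      have hdrop : t.drop 4 ≠ [] := by
        intro hcon
        have := congrArg List.length hcon
        simp [List.length_drop] at this
        omega
      obtain ⟨d, r, hdr⟩ := List.exists_cons_of_ne_nil hdrop
      have hct : c :: t = (c :: t.take 4) ++ (d :: r) := by
        rw [← hdr]; simp
      have hchunks : pvChunks (c :: t) = (c :: t.take 4) :: pvChunks (d :: r) := by
        rw [hct, pvChunks, dif_neg (by simp)]
        have hlen : ((c :: t.take 4) : List Char).length = 5 := by simp; omega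
        rw [List.take_append_of_le_length (by omega), List.drop_append_of_le_length (by omega)]
        congr 2
        · rw [List.take_of_length_le (by simp; try omega)]
        · rw [show ((c :: t.take 4) : List Char).drop 5 = [] from by
            apply List.eq_nil_of_length_eq_zero; simp [List.length_drop]; try omega]
          simp
      rw [hchunks]
      have hrec : pvChunks (d :: r) = (d :: r).take 5 :: pvChunks ((d :: r).drop 5) := by
        rw [pvChunks, dif_neg (by simp)]
      rw [hrec, PySem.Chars.join_cons_cons, ← hrec]
      have hlink : t.length = r.length + 5 := by
        have h' := congrArg List.length hdr
        simp [List.length_drop] at h'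
        omega
      rw [ih d r (by omega) (by omega)]
      -- now the right-hand side
      have htsplit : t = t.take 4 ++ (d :: r) := by
        rw [← hdr]; simp
      conv_rhs => rw [htsplit]
      rw [pvCanon_append]
      have htk : (t.take 4).length = 4 := by simp; omega
      rw [pvCanon_id (t.take 4) 1 (by norm_num) (by omega), htk]
      have hpref5 : pvPref 5 = [' '] := by decide
      have hshift : pvCanon 6 r = pvCanon 1 r :=
        pvCanon_shift r 6 1 (by norm_num) (by norm_num) (by decide) (by omega) (by omega)
      simp [pvCanon, hpref5, hshift]

-- the whole output
theorem pvMain (n : Nat) : ∀ (c : Char) (t : List Char), t.length ≤ n →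
    PySem.Chars.join ['\n'] ((pvChunks (pvChunks (c :: t))).map (PySem.Chars.join [' ']))
      = c :: pvCanon 1 t := by
  induction n with
  | zero =>
    intro c t ht
    have : t = [] := by apply List.eq_nil_of_length_eq_zero; omega
    subst this
    rw [pvChunks_small (pvChunks ([c] : List Char)) (pvChunks_ne_nil _ (by simp)) (by rw [pvChunks_length]; simp)]
    rw [List.map_singleton, PySem.Chars.join_singleton]
    exact pvLine 0 c [] (by simp) (by simp)
  | succ n ih =>
    intro c t ht
    by_cases h24 : t.length ≤ 24
    · -- one line
      have hcl : ((c :: t) : List Char).length ≤ 25 := by simp; omega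
      have hch5 : (pvChunks ((c :: t) : List Char)).length ≤ 5 := by
        rw [pvChunks_length]; simp; try omega
      rw [pvChunks_small _ (pvChunks_ne_nil _ (by simp)) hch5]
      rw [List.map_singleton, PySem.Chars.join_singleton]
      exact pvLine t.length c t le_rfl h24
    · -- at least two lines: peel the first 25 characters
      have hdrop : t.drop 24 ≠ [] := by
        intro hcon
        have := congrArg List.length hcon
        simp [List.length_drop] at this
        omega
      obtain ⟨d, r, hdr⟩ := List.exists_cons_of_ne_nil hdrop
      have hct : c :: t = (c :: t.take 24) ++ (d :: r) := by
        rw [← hdr]; simp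
      have ha25 : ((c :: t.take 24) : List Char).length = 25 := by simp; omega
      have hsplit1 : pvChunks ((c :: t) : List Char)
          = pvChunks (c :: t.take 24) ++ pvChunks (d :: r) := by
        rw [hct, pvChunks_append _ _ (by rw [ha25])]
      have hch5 : (pvChunks ((c :: t.take 24) : List Char)).length = 5 := by
        rw [pvChunks_length, ha25]
      have hsplit2 : pvChunks (pvChunks ((c :: t) : List Char))
          = [pvChunks (c :: t.take 24)] ++ pvChunks (pvChunks ((d :: r) : List Char)) := by
        rw [hsplit1, pvChunks_append _ _ (by rw [hch5])]
        rw [pvChunks_small _ (pvChunks_ne_nil _ (by simp)) (by omega)]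
      rw [hsplit2]
      -- expose the cons-cons shape for join
      have hbne : pvChunks (pvChunks ((d :: r) : List Char)) ≠ [] :=
        pvChunks_ne_nil _ (pvChunks_ne_nil _ (by simp))
      obtain ⟨z, w, hzw⟩ := List.exists_cons_of_ne_nil hbne
      rw [List.singleton_append, List.map_cons, hzw, List.map_cons,
          PySem.Chars.join_cons_cons, ← List.map_cons, ← hzw]
      have hlink : t.length = r.length + 25 := by
        have h' := congrArg List.length hdr
        simp [List.length_drop] at h'
        omega
      rw [ih d r (by omega)]
      rw [pvLine 24 c (t.take 24) (by simp) (by simp)]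
      -- right-hand side
      have htsplit : t = t.take 24 ++ (d :: r) := by rw [← hdr]; simp
      conv_rhs => rw [htsplit]
      rw [pvCanon_append]
      have htk : ((t.take 24) : List Char).length = 24 := by simp; omega
      rw [htk]
      have hpref25 : pvPref 25 = ['\n'] := by decide
      have hshift : pvCanon 26 r = pvCanon 1 r := by
        rw [show (26:Int) = 1 + 25 by norm_num, pvCanon_period r 1]
      simp [pvCanon, hpref25, hshift]

-- ===== VERDICT (by name: the statement is the Claim_ definition above) =====
theorem cipherWords_spec : Claim_equal_cipherWords := by
  intro text _ hpre
  unfold Spec_cipherWords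
  have hne : text.toList ≠ [] := by
    intro hcon
    exact hpre (by
      have := congrArg String.ofList hcon
      simpa using this)
  obtain ⟨c, t, hct⟩ := List.exists_cons_of_ne_nil hne
  rw [pvA_eq text c t hct, pvB_eq text, hct, pvMain t.length c t le_rfl]
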